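-- pv_equiv track=rewrite | github.com/jungle-5th/algorithm-study | 구자건/정답/2961_도영이가_만든_맛있는_음식.py | making_food
-- ===== SOURCE A (Python) =====
-- def making_food(sour_list, bitter_list, n_food):
--     best_balance = 10**9
--     for i in range(1, 2**(n_food)):
--         sour = 1
--         bitter = 0
--         combination = list(format(i, 'b').rjust(n_food, "0"))
--         for j in range(n_food):
--             if(combination[j] == '1'):
--                 sour *= sour_list[j]
--                 bitter += bitter_list[j]
--         best_balance = min(best_balance, abs(sour-bitter))
--     return best_balance
-- ===== SOURCE B (Python) =====
-- def making_food(sour_list, bitter_list, n_food):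
--     def dfs(items, sour, bitter, taken):
--         if not items:
--             return abs(sour - bitter) if taken else 10**9
--         (s, b) = items[0]
--         rest = items[1:]
--         return min(dfs(rest, sour * s, bitter + b, True),
--                    dfs(rest, sour, bitter, taken))
--     items = [(sour_list[j], bitter_list[j]) for j in range(n_food)]
--     return dfs(items, 1, 0, False)
-- ===== Notes on version B (the rewrite author's own statement) =====
-- stated objective: alternative
-- what changed: Replaced the per-subset binary-string formatting and index scan with a branching recursion over the prefix item list that carries the running product and sum; it trades A's counter-plus-bitstring enumeration for structural divide-in-two recursion at similar measured cost.
import Mathlib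
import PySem

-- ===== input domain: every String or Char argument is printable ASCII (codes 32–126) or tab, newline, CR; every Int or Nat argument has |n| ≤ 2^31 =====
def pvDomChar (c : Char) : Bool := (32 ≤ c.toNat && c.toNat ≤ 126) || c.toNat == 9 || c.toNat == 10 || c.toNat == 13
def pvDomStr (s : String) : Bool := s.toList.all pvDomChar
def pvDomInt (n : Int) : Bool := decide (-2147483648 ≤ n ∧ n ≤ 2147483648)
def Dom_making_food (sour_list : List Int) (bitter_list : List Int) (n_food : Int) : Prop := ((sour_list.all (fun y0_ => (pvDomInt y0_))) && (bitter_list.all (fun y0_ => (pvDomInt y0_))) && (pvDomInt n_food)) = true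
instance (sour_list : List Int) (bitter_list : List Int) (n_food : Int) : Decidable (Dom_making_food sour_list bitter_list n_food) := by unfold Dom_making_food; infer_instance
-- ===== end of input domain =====

-- B replaces A's per-subset binary-string formatting and bit scan by a branching
-- recursion carrying the running product and sum (objective: alternative algorithm, similar cost).

-- ===== PORT A =====
-- format(i,'b') for i ≥ 1: binary digits, most significant first (hand port, exact for i ≥ 1;
-- A only ever calls it with 1 ≤ i).
def natBinAux : Nat → List Char
  | 0 => []
  | n + 1 => natBinAux ((n + 1) / 2) ++ [if (n + 1) % 2 = 1 then '1' else '0']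
decreasing_by exact Nat.div_lt_self (Nat.succ_pos n) (by omega)

-- format(i,'b') : also exact at i = 0 ("0"); negative i never occurs under Pre_.
def fmtB (i : Nat) : List Char := if i = 0 then ['0'] else natBinAux i

-- str.rjust(n, "0") on a char list (exact: pads on the left up to width n).
def rjustZ (n : Nat) (s : List Char) : List Char := List.replicate (n - s.length) '0' ++ s

def making_food (sour_list : List Int) (bitter_list : List Int) (n_food : Int) : Int :=
  (PySem.List.pyRange 1 (2 ^ n_food.toNat) 1).foldl (fun best i =>
    let combination := rjustZ n_food.toNat (fmtB i.toNat)
    let sb := (PySem.List.pyRange 0 n_food 1).foldl (fun (sb : Int × Int) j =>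
      if (PySem.List.pyGet? combination j).getD ' ' = '1' then
        (sb.1 * (PySem.List.pyGet? sour_list j).getD 0,
         sb.2 + (PySem.List.pyGet? bitter_list j).getD 0)
      else sb) (1, 0)
    min best |sb.1 - sb.2|) (10 ^ 9)

-- ===== PORT B =====
def dfsB : List (Int × Int) → Int → Int → Bool → Int
  | [], sour, bitter, taken => if taken then |sour - bitter| else 10 ^ 9
  | (s, b) :: rest, sour, bitter, taken =>
      min (dfsB rest (sour * s) (bitter + b) true) (dfsB rest sour bitter taken)

def making_food_alt (sour_list : List Int) (bitter_list : List Int) (n_food : Int) : Int :=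
  dfsB ((PySem.List.pyRange 0 n_food 1).map (fun j =>
      ((PySem.List.pyGet? sour_list j).getD 0, (PySem.List.pyGet? bitter_list j).getD 0)))
    1 0 false

-- ===== PRECONDITION & SPEC =====
-- A raises (TypeError on range for negative n_food; IndexError when n_food exceeds a list length);
-- exactly those inputs are excluded.
def Pre_making_food (sour_list : List Int) (bitter_list : List Int) (n_food : Int) : Prop :=
  0 ≤ n_food ∧ n_food ≤ sour_list.length ∧ n_food ≤ bitter_list.length
instance (sour_list : List Int) (bitter_list : List Int) (n_food : Int) : Decidable (Pre_making_food sour_list bitter_list n_food) := by unfold Pre_making_food; infer_instance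

def pvWitness_making_food : List Int × List Int × Int := ([3, 2], [7, 4], 2)

def Spec_making_food (sour_list : List Int) (bitter_list : List Int) (n_food : Int) (out : Int) : Prop := out = making_food_alt sour_list bitter_list n_food
instance (sour_list : List Int) (bitter_list : List Int) (n_food : Int) (out : Int) : Decidable (Spec_making_food sour_list bitter_list n_food out) := by unfold Spec_making_food; infer_instance

-- ===== CLAIM (what is proved, stated in full; the proofs are below) =====
def Claim_equal_making_food : Prop := ∀ (sour_list : List Int) (bitter_list : List Int) (n_food : Int), Dom_making_food sour_list bitter_list n_food → Pre_making_food sour_list bitter_list n_food → Spec_making_food sour_list bitter_list n_food (making_food sour_list bitter_list n_food)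

-- ===== LEMMAS AND PROOFS =====

-- proof-side model of one padded binary digit / the padded digit string (MSB first)
def bitChar (b : Bool) : Char := if b then '1' else '0'

def bitsL : Nat → Nat → List Char
  | 0, _ => []
  | m + 1, i => bitChar (i.testBit m) :: bitsL m i

-- proof-side model of one subset: (product of chosen sours, sum of chosen bitters),
-- item at distance `rest.length` from the end ↔ bit `rest.length` of the index
def pv : List (Int × Int) → Nat → Int × Int
  | [], _ => (1, 0)
  | (s, b) :: rest, i =>
      if i.testBit rest.length then (s * (pv rest i).1, b + (pv rest i).2) else pv rest i

lemma length_bitsL (n i : Nat) : (bitsL n i).length = n := by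
  induction n with
  | zero => rfl
  | succ m ih => simp [bitsL, ih]

lemma bitsL_snoc (m i : Nat) : bitsL (m + 1) i = bitsL m (i / 2) ++ [bitChar (i.testBit 0)] := by
  induction m generalizing i with
  | zero => simp [bitsL]
  | succ k ih =>
    calc bitsL (k + 1 + 1) i = bitChar (i.testBit (k + 1)) :: bitsL (k + 1) i := rfl
      _ = bitChar ((i / 2).testBit k) :: (bitsL k (i / 2) ++ [bitChar (i.testBit 0)]) := by
            rw [ih, Nat.testBit_div_two]
      _ = bitsL (k + 1) (i / 2) ++ [bitChar (i.testBit 0)] := rfl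

lemma natBinAux_eq : ∀ i : Nat, 1 ≤ i → natBinAux i = bitsL (Nat.log2 i + 1) i := by
  intro i
  induction i using Nat.strong_induction_on with
  | _ i ih =>
    intro hi
    obtain ⟨n, rfl⟩ : ∃ n, i = n + 1 := ⟨i - 1, by omega⟩
    by_cases h0 : n = 0
    · subst h0
      rw [Nat.log2_def]
      norm_num
      simp [natBinAux, bitsL, bitChar]
    · have hn2 : 2 ≤ n + 1 := by omega
      simp only [natBinAux]
      rw [ih ((n + 1) / 2) (by omega) (by omega)]
      have hlog : Nat.log2 (n + 1) = Nat.log2 ((n + 1) / 2) + 1 := by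
        rw [Nat.log2_def]; simp [hn2]
      rw [hlog]
      conv_rhs => rw [bitsL_snoc]
      congr 1
      simp [bitChar, Nat.testBit_zero]

lemma bitsL_high (n L i : Nat) (h1 : L ≤ n) (h2 : i < 2 ^ L) :
    bitsL n i = List.replicate (n - L) '0' ++ bitsL L i := by
  induction n with
  | zero =>
    have : L = 0 := by omega
    subst this; simp
  | succ m ih =>
    by_cases hL : L = m + 1
    · subst hL; simp
    · have h1' : L ≤ m := by omega
      have hfalse : i.testBit m = false :=
        Nat.testBit_lt_two_pow (lt_of_lt_of_le h2 (Nat.pow_le_pow_right (by omega) h1'))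
      have hrep : m + 1 - L = (m - L) + 1 := by omega
      rw [hrep]
      simp [bitsL, hfalse, ih h1', List.replicate_succ, bitChar]

lemma fmt_pad (n i : Nat) (h1 : 1 ≤ i) (h2 : i < 2 ^ n) : rjustZ n (fmtB i) = bitsL n i := by
  have hi0 : i ≠ 0 := by omega
  have hlt : Nat.log2 i < n := (Nat.log2_lt hi0).2 h2
  have h2' : i < 2 ^ (Nat.log2 i + 1) := (Nat.log2_lt hi0).1 (by omega)
  rw [fmtB, if_neg hi0, natBinAux_eq i h1, rjustZ, length_bitsL,
      bitsL_high n (Nat.log2 i + 1) i (by omega) h2']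

lemma pv_pow_add (items : List (Int × Int)) (m k : Nat) (h1 : items.length ≤ m) (h2 : k < 2 ^ m) :
    pv items (2 ^ m + k) = pv items k := by
  induction items with
  | nil => rfl
  | cons x rest ih =>
    obtain ⟨s, b⟩ := x
    have hlt : rest.length < m := by simp at h1; omega
    simp only [pv, Nat.testBit_two_pow_add_gt hlt, ih (by omega)]

lemma inner_eq : ∀ (n : Nat) (sl bl : List Int) (i : Nat) (s b : Int),
    n ≤ sl.length → n ≤ bl.length →
    (List.range n).foldl (fun (sb : Int × Int) (j : Nat) =>
        if ((bitsL n i)[j]?.getD ' ') = '1' then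
          (sb.1 * (sl[j]?.getD 0), sb.2 + (bl[j]?.getD 0)) else sb) (s, b)
      = (s * (pv ((sl.take n).zip (bl.take n)) i).1,
         b + (pv ((sl.take n).zip (bl.take n)) i).2) := by
  intro n
  induction n with
  | zero => intro sl bl i s b _ _; simp [pv]
  | succ m ih =>
    intro sl bl i s b hsl hbl
    cases sl with
    | nil => simp at hsl
    | cons x sl' =>
      cases bl with
      | nil => simp at hbl
      | cons y bl' =>
        have hsl' : m ≤ sl'.length := by simp at hsl; omega
        have hbl' : m ≤ bl'.length := by simp at hbl; omega
        rw [List.range_succ_eq_map, List.foldl_cons, List.foldl_map]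
        simp only [bitsL, List.getElem?_cons_zero, List.getElem?_cons_succ, Option.getD_some]
        have hrest : ((sl'.take m).zip (bl'.take m)).length = m := by
          simp [List.length_zip, List.length_take]; omega
        by_cases hbit : i.testBit m
        · simp only [hbit, bitChar, if_true]
          rw [ih sl' bl' i (s * x) (b + y) hsl' hbl']
          simp only [List.take_succ_cons, List.zip_cons_cons, pv, hrest, hbit, if_true,
            Prod.mk.injEq]
          exact ⟨by ring, by ring⟩
        · simp only [hbit, bitChar]
          rw [if_neg (by decide), ih sl' bl' i s b hsl' hbl']
          simp [pv, hrest, hbit]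

lemma mapRange_zip : ∀ (n : Nat) (sl bl : List Int), n ≤ sl.length → n ≤ bl.length →
    (List.range n).map (fun (j : Nat) => ((sl[j]?.getD 0 : Int), (bl[j]?.getD 0 : Int)))
      = (sl.take n).zip (bl.take n) := by
  intro n
  induction n with
  | zero => intro sl bl _ _; simp
  | succ m ih =>
    intro sl bl hsl hbl
    cases sl with
    | nil => simp at hsl
    | cons x sl' =>
      cases bl with
      | nil => simp at hbl
      | cons y bl' =>
        rw [List.range_succ_eq_map, List.map_cons, List.map_map]
        simp only [List.getElem?_cons_zero, Option.getD_some, Function.comp_def,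
          List.getElem?_cons_succ]
        rw [ih sl' bl' (by simp at hsl; omega) (by simp at hbl; omega)]
        simp

lemma lemA : ∀ (items : List (Int × Int)) (s b acc : Int),
    (List.range (2 ^ items.length)).foldl
        (fun best k => min best |s * (pv items k).1 - (b + (pv items k).2)|) acc
      = min acc (dfsB items s b true) := by
  intro items
  induction items with
  | nil => intro s b acc; simp [pv, dfsB]
  | cons x rest ih =>
    obtain ⟨sv, bv⟩ := x
    intro s b acc
    have hsplit : 2 ^ (((sv, bv) :: rest).length) = 2 ^ rest.length + 2 ^ rest.length := by
      simp [List.length_cons]; ring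
    rw [hsplit, List.range_add, List.foldl_append, List.foldl_map]
    have hc1 : ∀ (a : Int), ∀ k ∈ List.range (2 ^ rest.length),
        (fun best k => min best |s * (pv ((sv, bv) :: rest) k).1 - (b + (pv ((sv, bv) :: rest) k).2)|) a k
          = (fun best k => min best |s * (pv rest k).1 - (b + (pv rest k).2)|) a k := by
      intro a k hk
      have hf : k.testBit rest.length = false := Nat.testBit_lt_two_pow (List.mem_range.1 hk)
      simp [pv, hf]
    rw [PySem.List.foldl_congr_mem _ _ _ _ hc1, ih]
    have hc2 : ∀ (a : Int), ∀ k ∈ List.range (2 ^ rest.length),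
        (fun x y => (fun best k => min best
            |s * (pv ((sv, bv) :: rest) k).1 - (b + (pv ((sv, bv) :: rest) k).2)|) x (2 ^ rest.length + y)) a k
          = (fun best k => min best |(s * sv) * (pv rest k).1 - ((b + bv) + (pv rest k).2)|) a k := by
      intro a k hk
      have hk' := List.mem_range.1 hk
      have ht : (2 ^ rest.length + k).testBit rest.length = true := by
        rw [Nat.testBit_two_pow_add_eq, Nat.testBit_lt_two_pow hk']; rfl
      simp only [pv, ht, if_true, pv_pow_add rest rest.length k (le_refl _) hk']
      congr 1
      congr 1
      ring
    rw [PySem.List.foldl_congr_mem _ _ _ _ hc2, ih]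
    simp only [dfsB]
    omega

lemma lemB : ∀ (items : List (Int × Int)) (s b acc : Int), acc ≤ 10 ^ 9 →
    (List.range (2 ^ items.length - 1)).foldl
        (fun best k => min best |s * (pv items (k + 1)).1 - (b + (pv items (k + 1)).2)|) acc
      = min acc (dfsB items s b false) := by
  intro items
  induction items with
  | nil =>
    intro s b acc hacc
    norm_num at hacc
    simp [dfsB]
    omega
  | cons x rest ih =>
    obtain ⟨sv, bv⟩ := x
    intro s b acc hacc
    have h1 : (1 : Nat) ≤ 2 ^ rest.length := Nat.one_le_two_pow
    have hsplit : 2 ^ (((sv, bv) :: rest).length) - 1 = (2 ^ rest.length - 1) + 2 ^ rest.length := by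
      simp [List.length_cons, pow_succ]; omega
    rw [hsplit, List.range_add, List.foldl_append, List.foldl_map]
    have hc1 : ∀ (a : Int), ∀ k ∈ List.range (2 ^ rest.length - 1),
        (fun best k => min best
            |s * (pv ((sv, bv) :: rest) (k + 1)).1 - (b + (pv ((sv, bv) :: rest) (k + 1)).2)|) a k
          = (fun best k => min best |s * (pv rest (k + 1)).1 - (b + (pv rest (k + 1)).2)|) a k := by
      intro a k hk
      have hf : (k + 1).testBit rest.length = false :=
        Nat.testBit_lt_two_pow (by have := List.mem_range.1 hk; omega)
      simp [pv, hf]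
    rw [PySem.List.foldl_congr_mem _ _ _ _ hc1, ih s b acc hacc]
    have hc2 : ∀ (a : Int), ∀ k ∈ List.range (2 ^ rest.length),
        (fun x y => (fun best k => min best
            |s * (pv ((sv, bv) :: rest) (k + 1)).1 - (b + (pv ((sv, bv) :: rest) (k + 1)).2)|) x
              ((2 ^ rest.length - 1) + y)) a k
          = (fun best k => min best |(s * sv) * (pv rest k).1 - ((b + bv) + (pv rest k).2)|) a k := by
      intro a k hk
      have hk' := List.mem_range.1 hk
      have hidx : (2 ^ rest.length - 1) + k + 1 = 2 ^ rest.length + k := by omega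
      have ht : (2 ^ rest.length + k).testBit rest.length = true := by
        rw [Nat.testBit_two_pow_add_eq, Nat.testBit_lt_two_pow hk']; rfl
      simp only [hidx, pv, ht, if_true, pv_pow_add rest rest.length k (le_refl _) hk']
      congr 1
      congr 1
      ring
    rw [PySem.List.foldl_congr_mem _ _ _ _ hc2, lemA]
    simp only [dfsB]
    omega

lemma dfsB_false_le (items : List (Int × Int)) : ∀ (s b : Int), dfsB items s b false ≤ 10 ^ 9 := by
  induction items with
  | nil => intro s b; simp [dfsB]
  | cons x rest ih =>
    obtain ⟨sv, bv⟩ := x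
    intro s b
    calc dfsB ((sv, bv) :: rest) s b false ≤ dfsB rest s b false := by
            simp only [dfsB]; exact min_le_right _ _
      _ ≤ 10 ^ 9 := ih s b

-- ===== VERDICT (by name: the statement is the Claim_ definition above) =====
theorem making_food_spec : Claim_equal_making_food := by
  intro sl bl n _ hpre
  obtain ⟨h0, hsl, hbl⟩ := hpre
  have hn : n = (n.toNat : Int) := (Int.toNat_of_nonneg h0).symm
  have hsl' : n.toNat ≤ sl.length := by omega
  have hbl' : n.toNat ≤ bl.length := by omega
  have hlen : ((sl.take n.toNat).zip (bl.take n.toNat)).length = n.toNat := by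
    simp [List.length_zip, List.length_take]; omega
  have hpr : PySem.List.pyRange 0 n 1 = (List.range n.toNat).map (fun (j : Nat) => (j : Int)) := by
    conv_lhs => rw [hn]
    exact PySem.List.pyRange_zero_natCast n.toNat
  have hb : ((2 : Int) ^ n.toNat - 1).toNat = 2 ^ n.toNat - 1 := by
    have : ((2 : Int) ^ n.toNat) = ((2 ^ n.toNat : Nat) : Int) := by push_cast; ring
    omega
  have hitems : (PySem.List.pyRange 0 n 1).map (fun j =>
      ((PySem.List.pyGet? sl j).getD 0, (PySem.List.pyGet? bl j).getD 0))
      = (sl.take n.toNat).zip (bl.take n.toNat) := by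
    rw [hpr, List.map_map]
    simp only [Function.comp_def, PySem.List.pyGet?_natCast]
    exact mapRange_zip n.toNat sl bl hsl' hbl'
  unfold Spec_making_food making_food making_food_alt
  rw [hitems]
  conv_lhs => rw [PySem.List.pyRange_one 1 (2 ^ n.toNat)]
  rw [List.foldl_map, hb]
  refine Eq.trans (PySem.List.foldl_congr_mem _ _
      (fun (best : Int) (k : Nat) =>
        min best |1 * (pv ((sl.take n.toNat).zip (bl.take n.toNat)) (k + 1)).1 -
          (0 + (pv ((sl.take n.toNat).zip (bl.take n.toNat)) (k + 1)).2)|) _ ?_) ?_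
  · intro a k hk
    have hp : (1 : Nat) ≤ 2 ^ n.toNat := Nat.one_le_two_pow
    have hk1 : k + 1 < 2 ^ n.toNat := by have := List.mem_range.1 hk; omega
    have htn : ((1 : Int) + (k : Int)).toNat = k + 1 := by omega
    beta_reduce
    simp only [htn, fmt_pad n.toNat (k + 1) (by omega) hk1, hpr, List.foldl_map,
      PySem.List.pyGet?_natCast,
      inner_eq n.toNat sl bl (k + 1) 1 0 hsl' hbl']
  · rw [show 2 ^ n.toNat - 1 = 2 ^ ((sl.take n.toNat).zip (bl.take n.toNat)).length - 1 from by
        rw [hlen]]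
    rw [lemB ((sl.take n.toNat).zip (bl.take n.toNat)) 1 0 (10 ^ 9) (le_refl _)]
    exact min_eq_right (dfsB_false_le _ 1 0)
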